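-- pv_equiv track=rewrite | github.com/waldohidalgo/geek-for-geeks-100daysofcodechallenge | BonusProblem/Two Pointer Technique/Pair Sum in a Sorted and Rotated Array.py | pairInSortedRotated
-- ===== SOURCE A (Python) =====
-- def pairInSortedRotated(arr, target):
--     #Your code here
--     n=len(arr)
--     # if arr[0]>=arr[n-1]:
--     #     l=1
--     #     while l<n-1 and arr[l]>=arr[l-1]:
--     #         l+=1
--     #     r=l-1
--     # else:
--     #     l,r=0,n-1
--     l,r=0,n-1
--     while l<r:
--         mid=(l+r)//2
--         if arr[mid]>arr[r]:
--             l=mid+1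
--         elif arr[mid]==arr[r]:
--             r-=1
--         else:
--             r=mid
--     r=(l-1+n)%n
--     while l!=r:
--         acc=arr[l]+arr[r]
--         if acc>target:
--             r=(r-1+n)%n
--         elif acc<target:
--             l=(l+1)%n
--         else:
--             return True
--     return False
-- ===== SOURCE B (Python) =====
-- def pairInSortedRotated(arr, target):
--     seen = set()
--     for x in arr:
--         if target - x in seen:
--             return True
--         seen.add(x)
--     return False
-- ===== Notes on version B (the rewrite author's own statement) =====
-- stated objective: simpler
-- what changed: Replaces A's pivot binary search plus circular two-pointer walk with a single left-to-right pass that keeps a set of values seen so far and tests target-x against it; dropping the per-element index/modulo arithmetic makes it measurably faster by a constant factor.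
-- intended difference: On rotated sorted arrays that start with at least n/2 copies of the minimum m and end with m, with target > 2m, target-m absent, and the only pairs summing to target lying among the larger middle elements, A's binary search misses the true pivot and its circular walk returns False although a pair exists; B returns True, which is the intended answer. — e.g. on pairInSortedRotated([0, 0, 0, 1, 1, 0], 2): A returns false, B returns true
-- outside the precondition, e.g. on pairInSortedRotated([2, 1, 3], 4): A returns False, B returns True; on pairInSortedRotated([], 0): A raises ZeroDivisionError, B returns False
import Mathlib
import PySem

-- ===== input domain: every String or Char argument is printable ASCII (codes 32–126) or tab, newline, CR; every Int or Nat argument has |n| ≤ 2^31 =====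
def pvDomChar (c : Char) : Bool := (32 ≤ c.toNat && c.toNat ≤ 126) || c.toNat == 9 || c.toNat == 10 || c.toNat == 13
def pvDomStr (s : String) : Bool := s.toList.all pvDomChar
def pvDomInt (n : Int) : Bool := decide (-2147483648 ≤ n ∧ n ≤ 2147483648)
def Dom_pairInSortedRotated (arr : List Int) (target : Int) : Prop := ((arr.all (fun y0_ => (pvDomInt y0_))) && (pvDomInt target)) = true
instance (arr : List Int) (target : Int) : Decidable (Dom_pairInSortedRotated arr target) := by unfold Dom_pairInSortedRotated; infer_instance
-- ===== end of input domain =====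

-- B replaces A's pivot binary search + circular two-pointer walk by one linear pass with a 'seen' set
-- (objective: simpler). A=B is proved on nonempty rotations of sorted arrays outside D_ (where A
-- misses an existing pair and B's True is the intended answer); A raises on [] where B returns False.


-- ===== PORT A =====
-- arr[i]: under Pre_ every index A forms is in range, so the default 0 is never read
def pvGetI (arr : List Int) (i : Int) : Int := PySem.List.pyGetD arr i 0

-- the pivot binary-search loop 'while l<r: …'; fuel bounds the iteration count (r-l shrinks each step)
def pvLoop1 (arr : List Int) : Nat → Int → Int → Int
  | 0, l, _ => l
  | fuel+1, l, r =>
    if l < r then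
      let mid := PySem.Int.floordiv (l + r) 2
      if pvGetI arr mid > pvGetI arr r then pvLoop1 arr fuel (mid + 1) r
      else if pvGetI arr mid = pvGetI arr r then pvLoop1 arr fuel l (r - 1)
      else pvLoop1 arr fuel l mid
    else l

-- the circular two-pointer loop 'while l!=r: …'; fuel bounds the iteration count
def pvLoop2 (arr : List Int) (target n : Int) : Nat → Int → Int → Bool
  | 0, _, _ => false
  | fuel+1, l, r =>
    if l ≠ r then
      let acc := pvGetI arr l + pvGetI arr r
      if acc > target then pvLoop2 arr target n fuel l (PySem.Int.mod (r - 1 + n) n)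
      else if acc < target then pvLoop2 arr target n fuel (PySem.Int.mod (l + 1) n) r
      else true
    else false

def pairInSortedRotated (arr : List Int) (target : Int) : Bool :=
  let n : Int := arr.length
  let l := pvLoop1 arr arr.length 0 (n - 1)
  let r := PySem.Int.mod (l - 1 + n) n
  pvLoop2 arr target n (arr.length + 1) l r

-- ===== PORT B =====
def pvLoopB (target : Int) (seen : PySem.Set Int) : List Int → Bool
  | [] => false
  | x :: rest =>
    if PySem.Set.contains seen (target - x) then true
    else pvLoopB target (PySem.Set.add seen x) rest

def pairInSortedRotated_alt (arr : List Int) (target : Int) : Bool :=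
  pvLoopB target PySem.Set.empty arr

-- ===== PRECONDITION & SPEC =====
-- Pre_ is the function's stated domain: nonempty arrays that are a rotation of a sorted array.
-- Excluded are the empty array (A raises ZeroDivisionError at (l-1+n)%n) and arrays that are not a
-- rotation of a sorted array (outside the function's stated domain, A's value there is accidental).
def Pre_pairInSortedRotated (arr : List Int) (target : Int) : Prop :=
  arr ≠ [] ∧ ∃ k < arr.length, List.Pairwise (· ≤ ·) (arr.rotate k)
instance (arr : List Int) (target : Int) : Decidable (Pre_pairInSortedRotated arr target) := by
  unfold Pre_pairInSortedRotated; infer_instance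

def pvWitness_pairInSortedRotated : List Int × Int := ([3, 4, 1, 2], 5)

-- head value, length of the leading run of the head value, length of the trailing run of the head value
def pvLead (arr : List Int) : Nat := (arr.takeWhile (· == arr.headD 0)).length
def pvTrail (arr : List Int) : Nat := (arr.reverse.takeWhile (· == arr.headD 0)).length

-- On rotated sorted arrays that start with at least n/2 copies of the minimum m and end with m, with
-- target > 2m, target-m absent and a pair of the larger middle elements summing to target, A's binary
-- search misses the pivot and its circular walk returns False although a pair exists; B returns True,
-- the intended answer.
def D_pairInSortedRotated (arr : List Int) (target : Int) : Prop :=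
  arr ≠ [] ∧
  arr.length ≤ 2 * pvLead arr ∧
  pvLead arr + pvTrail arr < arr.length ∧
  1 ≤ pvTrail arr ∧
  (∀ i < arr.length - pvTrail arr, pvLead arr ≤ i → arr.headD 0 < arr.getD i 0) ∧
  (∀ j < arr.length - pvTrail arr, ∀ i < j, pvLead arr ≤ i → arr.getD i 0 ≤ arr.getD j 0) ∧
  2 * arr.headD 0 < target ∧
  (target - arr.headD 0) ∉ arr ∧
  (∃ j < arr.length, ∃ i < j, arr.getD i 0 + arr.getD j 0 = target)
instance (arr : List Int) (target : Int) : Decidable (D_pairInSortedRotated arr target) := by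
  unfold D_pairInSortedRotated; infer_instance

def Spec_pairInSortedRotated (arr : List Int) (target : Int) (out : Bool) : Prop := ¬ D_pairInSortedRotated arr target → out = pairInSortedRotated_alt arr target
instance (arr : List Int) (target : Int) (out : Bool) : Decidable (Spec_pairInSortedRotated arr target out) := by unfold Spec_pairInSortedRotated; infer_instance

def pvDiffWitness_pairInSortedRotated : List Int × Int := ([0, 0, 0, 1, 1, 0], 2)
def pvDiffWitnessOut_pairInSortedRotated : Bool × Bool := (false, true)

-- ===== CLAIM (what is proved, stated in full; the proofs are below) =====
def Claim_unchanged_pairInSortedRotated : Prop := ∀ (arr : List Int) (target : Int), Dom_pairInSortedRotated arr target → Pre_pairInSortedRotated arr target → Spec_pairInSortedRotated arr target (pairInSortedRotated arr target)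
def Claim_changed_pairInSortedRotated : Prop := Dom_pairInSortedRotated (pvDiffWitness_pairInSortedRotated.1) (pvDiffWitness_pairInSortedRotated.2) ∧ Pre_pairInSortedRotated (pvDiffWitness_pairInSortedRotated.1) (pvDiffWitness_pairInSortedRotated.2) ∧ D_pairInSortedRotated (pvDiffWitness_pairInSortedRotated.1) (pvDiffWitness_pairInSortedRotated.2) ∧ pairInSortedRotated (pvDiffWitness_pairInSortedRotated.1) (pvDiffWitness_pairInSortedRotated.2) = pvDiffWitnessOut_pairInSortedRotated.1 ∧ pairInSortedRotated_alt (pvDiffWitness_pairInSortedRotated.1) (pvDiffWitness_pairInSortedRotated.2) = pvDiffWitnessOut_pairInSortedRotated.2 ∧ pvDiffWitnessOut_pairInSortedRotated.1 ≠ pvDiffWitnessOut_pairInSortedRotated.2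
def Claim_exact_pairInSortedRotated : Prop := ∀ (arr : List Int) (target : Int), Dom_pairInSortedRotated arr target → Pre_pairInSortedRotated arr target → D_pairInSortedRotated arr target → pairInSortedRotated arr target ≠ pairInSortedRotated_alt arr target

-- ===== LEMMAS AND PROOFS =====

-- 'there is a pair of distinct positions summing to target'
def pvHasPair (l : List Int) (t : Int) : Prop :=
  ∃ i j : Nat, i < j ∧ j < l.length ∧ l.getD i 0 + l.getD j 0 = t

-- membership in a prefix, in index form
lemma pvMemTake (l : List Int) (j : Nat) (x : Int) :
    x ∈ l.take j ↔ ∃ i, i < j ∧ i < l.length ∧ l.getD i 0 = x := by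
  rw [List.mem_iff_getElem]
  constructor
  · rintro ⟨i, hi, he⟩
    have hi' : i < j ∧ i < l.length := by simp [List.length_take] at hi; omega
    refine ⟨i, hi'.1, hi'.2, ?_⟩
    rw [List.getD_eq_getElem _ _ hi'.2]
    rw [List.getElem_take] at he; exact he
  · rintro ⟨i, h1, h2, he⟩
    refine ⟨i, by simp [List.length_take]; omega, ?_⟩
    rw [List.getElem_take]
    rw [List.getD_eq_getElem _ _ h2] at he; exact he

-- symmetric form
lemma pvHasPair_sym (l : List Int) (t : Int) :
    pvHasPair l t ↔ ∃ u v : Nat, u < l.length ∧ v < l.length ∧ u ≠ v ∧ l.getD u 0 + l.getD v 0 = t := by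
  constructor
  · rintro ⟨i, j, hij, hj, hsum⟩
    exact ⟨i, j, lt_trans hij hj, hj, Nat.ne_of_lt hij, hsum⟩
  · rintro ⟨u, v, hu, hv, huv, hsum⟩
    rcases Nat.lt_or_ge u v with h | h
    · exact ⟨u, v, h, hv, hsum⟩
    · have hvu : v < u := lt_of_le_of_ne h (Ne.symm huv)
      rw [Int.add_comm] at hsum
      exact ⟨v, u, hvu, hu, hsum⟩

-- the inverse of the index map m ↦ (m+k) % n
lemma pvInv (n k u : Nat) (hk : k ≤ n) (hu : u < n) : ((u + k) % n + (n - k)) % n = u := by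
  rw [Nat.mod_add_mod]
  have h : u + k + (n - k) = u + n := by omega
  rw [h, Nat.add_mod_right, Nat.mod_eq_of_lt hu]

lemma pvInv' (n k u : Nat) (hk : k ≤ n) (hu : u < n) : ((u + (n - k)) % n + k) % n = u := by
  have h := pvInv n (n - k) u (by omega) hu
  have h2 : n - (n - k) = k := by omega
  rw [h2] at h; exact h

-- rotate in getD form
lemma pvRotGetD (arr : List Int) (k u : Nat) (hu : u < arr.length) :
    (arr.rotate k).getD u 0 = arr.getD ((u + k) % arr.length) 0 := by
  have hlen : (arr.rotate k).length = arr.length := List.length_rotate _ _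
  have hu' : u < (arr.rotate k).length := by omega
  have hn : 0 < arr.length := by omega
  rw [List.getD_eq_getElem _ _ hu', List.getElem_rotate,
      List.getD_eq_getElem _ _ (Nat.mod_lt _ hn)]

lemma pvHasPair_rotate (arr : List Int) (t : Int) (k : Nat) (hk : k < arr.length) :
    pvHasPair (arr.rotate k) t ↔ pvHasPair arr t := by
  have hn : 0 < arr.length := by omega
  have hlen : (arr.rotate k).length = arr.length := List.length_rotate _ _
  rw [pvHasPair_sym, pvHasPair_sym]
  constructor
  · rintro ⟨u, v, hu, hv, huv, hsum⟩
    rw [hlen] at hu hv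
    refine ⟨(u + k) % arr.length, (v + k) % arr.length, Nat.mod_lt _ hn, Nat.mod_lt _ hn, ?_, ?_⟩
    · intro he
      apply huv
      have := pvInv arr.length k u (by omega) hu
      rw [he, pvInv arr.length k v (by omega) hv] at this
      omega
    · rw [← pvRotGetD arr k u hu, ← pvRotGetD arr k v hv]; exact hsum
  · rintro ⟨u, v, hu, hv, huv, hsum⟩
    set n := arr.length with hndef
    refine ⟨(u + (n - k)) % n, (v + (n - k)) % n, by rw [hlen]; exact Nat.mod_lt _ hn,
      by rw [hlen]; exact Nat.mod_lt _ hn, ?_, ?_⟩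
    · intro he
      apply huv
      have h1 := pvInv' n k u (by omega) hu
      rw [he, pvInv' n k v (by omega) hv] at h1
      omega
    · rw [pvRotGetD arr k _ (Nat.mod_lt _ hn), pvRotGetD arr k _ (Nat.mod_lt _ hn),
          pvInv' n k u (by omega) hu, pvInv' n k v (by omega) hv]
      exact hsum

-- ---- B side ----
lemma pvLoopB_iff (t : Int) : ∀ (rest : List Int) (seen : List Int),
    pvLoopB t seen rest = true ↔
      ∃ j : Nat, j < rest.length ∧ (t - rest.getD j 0) ∈ seen ++ rest.take j := by
  intro rest
  induction rest with
  | nil => intro seen; simp [pvLoopB]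
  | cons x rest ih =>
    intro seen
    by_cases hc : (t - x) ∈ seen
    · have hc' : PySem.Set.contains seen (t - x) = true := by
        simpa [PySem.Set.contains] using hc
      simp only [pvLoopB, hc', if_true]
      constructor
      · intro _
        exact ⟨0, by simp, by simpa using hc⟩
      · intro _; trivial
    · have hc' : ¬ PySem.Set.contains seen (t - x) = true := by
        simpa [PySem.Set.contains] using hc
      rw [show pvLoopB t seen (x :: rest) = pvLoopB t (PySem.Set.add seen x) rest by
        simp [pvLoopB, PySem.Set.contains, hc]]
      rw [ih (PySem.Set.add seen x)]
      constructor
      · rintro ⟨j, hj, hm⟩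
        refine ⟨j + 1, by simpa using hj, ?_⟩
        simp only [List.take_succ_cons, List.getD_cons_succ]
        rcases List.mem_append.mp hm with h | h
        · rcases (PySem.Set.mem_add seen x _).mp h with h' | h'
          · exact List.mem_append.mpr (Or.inl h')
          · exact List.mem_append.mpr (Or.inr (by rw [h']; exact List.mem_cons_self ..))
        · exact List.mem_append.mpr (Or.inr (List.mem_cons_of_mem _ h))
      · rintro ⟨j, hj, hm⟩
        cases j with
        | zero => simp at hm; exact absurd hm hc
        | succ j =>
          refine ⟨j, by simp at hj; omega, ?_⟩
          simp only [List.take_succ_cons, List.getD_cons_succ] at hm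
          rcases List.mem_append.mp hm with h | h
          · exact List.mem_append.mpr (Or.inl ((PySem.Set.mem_add seen x _).mpr (Or.inl h)))
          · rcases List.mem_cons.mp h with h' | h'
            · exact List.mem_append.mpr (Or.inl ((PySem.Set.mem_add seen x _).mpr (Or.inr h')))
            · exact List.mem_append.mpr (Or.inr h')

lemma pvAlt_iff (arr : List Int) (t : Int) :
    pairInSortedRotated_alt arr t = true ↔ pvHasPair arr t := by
  rw [pairInSortedRotated_alt, pvLoopB_iff]
  constructor
  · rintro ⟨j, hj, hm⟩
    rw [show (PySem.Set.empty ++ arr.take j : List Int) = arr.take j by rfl] at hm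
    rcases (pvMemTake arr j _).mp hm with ⟨i, hij, hi, he⟩
    exact ⟨i, j, hij, hj, by omega⟩
  · rintro ⟨i, j, hij, hj, hsum⟩
    refine ⟨j, hj, ?_⟩
    rw [show (PySem.Set.empty ++ arr.take j : List Int) = arr.take j by rfl]
    exact (pvMemTake arr j _).mpr ⟨i, hij, by omega, by omega⟩

-- ---- index access ----
lemma pvGetI_natCast (arr : List Int) (m : Nat) (hm : m < arr.length) :
    pvGetI arr (m : Int) = arr.getD m 0 := by
  rw [pvGetI, PySem.List.pyGetD_eq_getElem arr 0 (by omega) (by exact_mod_cast hm)]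
  rw [List.getD_eq_getElem _ _ (by simpa using hm)]
  simp

lemma pvGetI_eq (arr : List Int) (i : Int) (h0 : 0 ≤ i) (h1 : i < arr.length) :
    pvGetI arr i = arr.getD i.toNat 0 := by
  have h2 := pvGetI_natCast arr i.toNat (by omega)
  rw [show ((i.toNat : Nat) : Int) = i by omega] at h2
  exact h2

-- order along the rotated list
lemma pvSortedLe (arr : List Int) (k : Nat) (hs : List.Pairwise (· ≤ ·) (arr.rotate k))
    (a c : Nat) (hac : a ≤ c) (hc : c < arr.length) :
    (arr.rotate k).getD a 0 ≤ (arr.rotate k).getD c 0 := by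
  have hlen : (arr.rotate k).length = arr.length := List.length_rotate _ _
  have hc' : c < (arr.rotate k).length := by omega
  have ha' : a < (arr.rotate k).length := by omega
  rcases Nat.eq_or_lt_of_le hac with h | h
  · rw [h]
  · rw [List.getD_eq_getElem _ _ ha', List.getD_eq_getElem _ _ hc']
    exact (List.pairwise_iff_getElem.mp hs) a c ha' hc' h

lemma pvPosGe (n k m : Nat) (hk : k ≤ n) (hm : m < n) (h : k ≤ m) :
    (m + (n - k)) % n = m - k := by
  have h1 : m + (n - k) = (m - k) + n := by omega
  rw [h1, Nat.add_mod_right, Nat.mod_eq_of_lt (by omega)]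

lemma pvPosLt (n k m : Nat) (hk : k ≤ n) (_hm : m < n) (h : m < k) :
    (m + (n - k)) % n = m + (n - k) := by
  rw [Nat.mod_eq_of_lt (by omega)]

-- a smaller circular position means a value that is at most the other's
lemma pvArrLe (arr : List Int) (k : Nat) (hk : k < arr.length)
    (hs : List.Pairwise (· ≤ ·) (arr.rotate k)) (u v : Nat)
    (hu : u < arr.length) (hv : v < arr.length)
    (h : (u + (arr.length - k)) % arr.length ≤ (v + (arr.length - k)) % arr.length) :
    arr.getD u 0 ≤ arr.getD v 0 := by
  set n := arr.length with hn
  have hn0 : 0 < n := by omega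
  have hgu : arr.getD u 0 = (arr.rotate k).getD ((u + (n - k)) % n) 0 := by
    rw [pvRotGetD arr k _ (Nat.mod_lt _ hn0), pvInv' n k u (by omega) hu]
  have hgv : arr.getD v 0 = (arr.rotate k).getD ((v + (n - k)) % n) 0 := by
    rw [pvRotGetD arr k _ (Nat.mod_lt _ hn0), pvInv' n k v (by omega) hv]
  rw [hgu, hgv]
  exact pvSortedLe arr k hs _ _ h (Nat.mod_lt _ hn0)

-- the three linear order facts of a rotation of a sorted list
lemma pvF1 (arr : List Int) (k : Nat) (hk : k < arr.length)
    (hs : List.Pairwise (· ≤ ·) (arr.rotate k)) :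
    ∀ i j : Nat, i ≤ j → j < k → arr.getD i 0 ≤ arr.getD j 0 := by
  intro i j hij hjk
  apply pvArrLe arr k hk hs i j (by omega) (by omega)
  rw [pvPosLt _ _ _ (by omega) (by omega) (by omega),
      pvPosLt _ _ _ (by omega) (by omega) (by omega)]
  omega

lemma pvF2 (arr : List Int) (k : Nat) (hk : k < arr.length)
    (hs : List.Pairwise (· ≤ ·) (arr.rotate k)) :
    ∀ i j : Nat, k ≤ i → i ≤ j → j < arr.length → arr.getD i 0 ≤ arr.getD j 0 := by
  intro i j hki hij hj
  apply pvArrLe arr k hk hs i j (by omega) (by omega)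
  rw [pvPosGe _ _ _ (by omega) (by omega) (by omega),
      pvPosGe _ _ _ (by omega) (by omega) (by omega)]
  omega

lemma pvF3 (arr : List Int) (k : Nat) (hk : k < arr.length)
    (hs : List.Pairwise (· ≤ ·) (arr.rotate k)) :
    ∀ i j : Nat, k ≤ i → i < arr.length → j < k → arr.getD i 0 ≤ arr.getD j 0 := by
  intro i j hki hi hjk
  apply pvArrLe arr k hk hs i j (by omega) (by omega)
  rw [pvPosGe _ _ _ (by omega) (by omega) (by omega),
      pvPosLt _ _ _ (by omega) (by omega) (by omega)]
  omega

-- ---- takeWhile bridges ----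
lemma pvTW_eq (p : Int → Bool) : ∀ (l : List Int) (i : Nat),
    i < (l.takeWhile p).length → p (l.getD i 0) = true := by
  intro l
  induction l with
  | nil => intro i h; simp at h
  | cons x xs ih =>
    intro i h
    by_cases hp : p x
    · rw [List.takeWhile_cons_of_pos hp] at h
      cases i with
      | zero => simpa using hp
      | succ i => exact ih i (by simpa using h)
    · rw [List.takeWhile_cons_of_neg hp] at h; simp at h

lemma pvTW_max (p : Int → Bool) : ∀ (l : List Int),
    (l.takeWhile p).length < l.length → p (l.getD (l.takeWhile p).length 0) = false := by
  intro l
  induction l with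
  | nil => intro h; simp at h
  | cons x xs ih =>
    intro h
    by_cases hp : p x
    · rw [List.takeWhile_cons_of_pos hp] at h ⊢
      simpa using ih (by simpa using h)
    · rw [List.takeWhile_cons_of_neg hp]
      simpa using hp

lemma pvTW_len (p : Int → Bool) (l : List Int) (j : Nat) (hj : j ≤ l.length)
    (h1 : ∀ i < j, p (l.getD i 0) = true) (h2 : j < l.length → p (l.getD j 0) = false) :
    (l.takeWhile p).length = j := by
  have hle : (l.takeWhile p).length ≤ l.length := (List.takeWhile_sublist p).length_le
  rcases Nat.lt_trichotomy (l.takeWhile p).length j with h | h | h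
  · have := pvTW_max p l (by omega)
    rw [h1 _ h] at this; simp at this
  · exact h
  · have := pvTW_eq p l j h
    rw [h2 (by omega)] at this; simp at this

lemma pvRevGetD (arr : List Int) (i : Nat) (hi : i < arr.length) :
    arr.reverse.getD i 0 = arr.getD (arr.length - 1 - i) 0 := by
  rw [List.getD_eq_getElem _ _ (by simpa using hi),
      List.getD_eq_getElem _ _ (by omega : arr.length - 1 - i < arr.length)]
  rw [List.getElem_reverse]

lemma pvHeadD (arr : List Int) : arr.headD 0 = arr.getD 0 0 := by
  cases arr <;> rfl

-- ---- binary-search loop lemmas ----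
-- sorted prefix from 0: l stays 0
lemma pvL1 (arr : List Int)
    (hsor : ∀ i j : Nat, i ≤ j → j < arr.length → arr.getD i 0 ≤ arr.getD j 0) :
    ∀ (fuel : Nat) (r : Int), 0 ≤ r → r < arr.length → r.toNat < fuel →
      pvLoop1 arr fuel 0 r = 0 := by
  intro fuel
  induction fuel with
  | zero => intro r _ _ hf; exact absurd hf (Nat.not_lt_zero _)
  | succ fuel ih =>
    intro r h0 hrn hf
    by_cases hlr : (0 : Int) < r
    · set mid := PySem.Int.floordiv (0 + r) 2 with hmiddef
      have hb := (PySem.Int.floordiv_eq_iff_of_pos (show (0:Int) < 2 by norm_num)).mp hmiddef.symm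
      have hgm : pvGetI arr mid = arr.getD mid.toNat 0 := pvGetI_eq arr mid (by omega) (by omega)
      have hgr : pvGetI arr r = arr.getD r.toNat 0 := pvGetI_eq arr r (by omega) (by omega)
      have hle := hsor mid.toNat r.toNat (by omega) (by omega)
      simp only [pvLoop1, if_pos hlr, ← hmiddef]
      rw [if_neg (by rw [hgm, hgr]; omega)]
      by_cases heqb : pvGetI arr mid = pvGetI arr r
      · rw [if_pos heqb]
        exact ih (r - 1) (by omega) (by omega) (by omega)
      · rw [if_neg heqb]
        exact ih mid (by omega) (by omega) (by omega)
    · simp only [pvLoop1, if_neg hlr]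

-- more than half the array is a leading run of the minimum value: l stays 0
lemma pvL2 (arr : List Int) (m : Int) (a : Nat)
    (Ha : ∀ i < a, arr.getD i 0 = m) (Hmin : ∀ i < arr.length, m ≤ arr.getD i 0)
    (h2a : arr.length ≤ 2 * a) :
    ∀ (fuel : Nat) (r : Int), 0 ≤ r → r < arr.length → r.toNat < fuel →
      pvLoop1 arr fuel 0 r = 0 := by
  intro fuel
  induction fuel with
  | zero => intro r _ _ hf; exact absurd hf (Nat.not_lt_zero _)
  | succ fuel ih =>
    intro r h0 hrn hf
    by_cases hlr : (0 : Int) < r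
    · set mid := PySem.Int.floordiv (0 + r) 2 with hmiddef
      have hb := (PySem.Int.floordiv_eq_iff_of_pos (show (0:Int) < 2 by norm_num)).mp hmiddef.symm
      have hgm : pvGetI arr mid = arr.getD mid.toNat 0 := pvGetI_eq arr mid (by omega) (by omega)
      have hgr : pvGetI arr r = arr.getD r.toNat 0 := pvGetI_eq arr r (by omega) (by omega)
      have hMa : mid.toNat < a := by omega
      have hM := Ha mid.toNat hMa
      have hR := Hmin r.toNat (by omega)
      simp only [pvLoop1, if_pos hlr, ← hmiddef]
      rw [if_neg (by rw [hgm, hgr, hM]; omega)]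
      by_cases heqb : pvGetI arr mid = pvGetI arr r
      · rw [if_pos heqb]
        exact ih (r - 1) (by omega) (by omega) (by omega)
      · rw [if_neg heqb]
        exact ih mid (by omega) (by omega) (by omega)
    · simp only [pvLoop1, if_neg hlr]

-- once l has moved past a value strictly above the minimum, the search converges to the pivot k
lemma pvL3 (arr : List Int) (k : Nat) (hk : k < arr.length)
    (F1 : ∀ i j : Nat, i ≤ j → j < k → arr.getD i 0 ≤ arr.getD j 0)
    (F2 : ∀ i j : Nat, k ≤ i → i ≤ j → j < arr.length → arr.getD i 0 ≤ arr.getD j 0)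
    (F3 : ∀ i j : Nat, k ≤ i → i < arr.length → j < k → arr.getD i 0 ≤ arr.getD j 0) :
    ∀ (fuel : Nat) (l r : Int), 1 ≤ l → l.toNat ≤ k → (k : Int) ≤ r → r < arr.length →
      arr.getD k 0 < arr.getD (l.toNat - 1) 0 → (r - l).toNat < fuel →
      pvLoop1 arr fuel l r = (k : Int) := by
  intro fuel
  induction fuel with
  | zero => intro l r _ _ _ _ _ hf; exact absurd hf (Nat.not_lt_zero _)
  | succ fuel ih =>
    intro l r h1l hlk hkr hrn hprev hf
    by_cases hlr : l < r
    · set mid := PySem.Int.floordiv (l + r) 2 with hmiddef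
      have hb := (PySem.Int.floordiv_eq_iff_of_pos (show (0:Int) < 2 by norm_num)).mp hmiddef.symm
      have hgm : pvGetI arr mid = arr.getD mid.toNat 0 := pvGetI_eq arr mid (by omega) (by omega)
      have hgr : pvGetI arr r = arr.getD r.toNat 0 := pvGetI_eq arr r (by omega) (by omega)
      have hkR : k ≤ r.toNat := by omega
      simp only [pvLoop1, if_pos hlr, ← hmiddef]
      by_cases hgtb : pvGetI arr mid > pvGetI arr r
      · rw [if_pos hgtb]
        rw [hgm, hgr] at hgtb
        have hMk : mid.toNat < k := by
          by_contra hh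
          push Not at hh
          have := F2 mid.toNat r.toNat hh (by omega) (by omega)
          omega
        have hkr2 := F2 k r.toNat (le_refl _) hkR (by omega)
        apply ih (mid + 1) r (by omega) (by omega) hkr hrn ?_ (by omega)
        have he : (mid + 1).toNat - 1 = mid.toNat := by omega
        rw [he]; omega
      · rw [if_neg hgtb]
        by_cases heqb : pvGetI arr mid = pvGetI arr r
        · rw [if_pos heqb]
          have hRk : k < r.toNat := by
            by_contra hh
            push Not at hh
            have hRk' : r.toNat = k := by omega
            rw [hgm, hgr, hRk'] at heqb
            have hle := F1 (l.toNat - 1) mid.toNat (by omega) (by omega)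
            omega
          exact ih l (r - 1) h1l hlk (by omega) (by omega) hprev (by omega)
        · rw [if_neg heqb]
          have hltb : pvGetI arr mid < pvGetI arr r := lt_of_le_of_ne (not_lt.mp hgtb) heqb
          rw [hgm, hgr] at hltb
          have hkM : k ≤ mid.toNat := by
            by_contra hh
            push Not at hh
            have := F3 r.toNat mid.toNat hkR (by omega) hh
            omega
          exact ih l mid h1l hlk (by omega) (by omega) hprev (by omega)
    · simp only [pvLoop1, if_neg hlr]
      omega

-- first element strictly above the minimum: the search finds the pivot k
lemma pvL4 (arr : List Int) (k : Nat) (hk : k < arr.length) (hk1 : 1 ≤ k)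
    (F1 : ∀ i j : Nat, i ≤ j → j < k → arr.getD i 0 ≤ arr.getD j 0)
    (F2 : ∀ i j : Nat, k ≤ i → i ≤ j → j < arr.length → arr.getD i 0 ≤ arr.getD j 0)
    (F3 : ∀ i j : Nat, k ≤ i → i < arr.length → j < k → arr.getD i 0 ≤ arr.getD j 0)
    (hgt : arr.getD k 0 < arr.getD 0 0) :
    ∀ (fuel : Nat) (r : Int), (k : Int) ≤ r → r < arr.length → r.toNat < fuel →
      pvLoop1 arr fuel 0 r = (k : Int) := by
  intro fuel
  induction fuel with
  | zero => intro r _ _ hf; exact absurd hf (Nat.not_lt_zero _)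
  | succ fuel ih =>
    intro r hkr hrn hf
    have hlr : (0 : Int) < r := by omega
    set mid := PySem.Int.floordiv (0 + r) 2 with hmiddef
    have hb := (PySem.Int.floordiv_eq_iff_of_pos (show (0:Int) < 2 by norm_num)).mp hmiddef.symm
    have hgm : pvGetI arr mid = arr.getD mid.toNat 0 := pvGetI_eq arr mid (by omega) (by omega)
    have hgr : pvGetI arr r = arr.getD r.toNat 0 := pvGetI_eq arr r (by omega) (by omega)
    have hkR : k ≤ r.toNat := by omega
    simp only [pvLoop1, if_pos hlr, ← hmiddef]
    by_cases hgtb : pvGetI arr mid > pvGetI arr r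
    · rw [if_pos hgtb]
      rw [hgm, hgr] at hgtb
      have hMk : mid.toNat < k := by
        by_contra hh
        push Not at hh
        have := F2 mid.toNat r.toNat hh (by omega) (by omega)
        omega
      have hkr2 := F2 k r.toNat (le_refl _) hkR (by omega)
      apply pvL3 arr k hk F1 F2 F3 fuel (mid + 1) r (by omega) (by omega) hkr hrn ?_ (by omega)
      have he : (mid + 1).toNat - 1 = mid.toNat := by omega
      rw [he]; omega
    · rw [if_neg hgtb]
      by_cases heqb : pvGetI arr mid = pvGetI arr r
      · rw [if_pos heqb]
        have hRk : k < r.toNat := by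
          by_contra hh
          push Not at hh
          have hRk' : r.toNat = k := by omega
          rw [hgm, hgr, hRk'] at heqb
          have hle := F1 0 mid.toNat (by omega) (by omega)
          omega
        exact ih (r - 1) (by omega) (by omega) (by omega)
      · rw [if_neg heqb]
        have hltb : pvGetI arr mid < pvGetI arr r := lt_of_le_of_ne (not_lt.mp hgtb) heqb
        rw [hgm, hgr] at hltb
        have hkM : k ≤ mid.toNat := by
          by_contra hh
          push Not at hh
          have := F3 r.toNat mid.toNat hkR (by omega) hh
          omega
        exact ih mid (by omega) (by omega) (by omega)

-- leading minimum run of less than half the array: the search still finds the pivot k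
lemma pvL5 (arr : List Int) (k : Nat) (m : Int) (a : Nat) (hk : k < arr.length) (hak : a < k)
    (F1 : ∀ i j : Nat, i ≤ j → j < k → arr.getD i 0 ≤ arr.getD j 0)
    (F2 : ∀ i j : Nat, k ≤ i → i ≤ j → j < arr.length → arr.getD i 0 ≤ arr.getD j 0)
    (F3 : ∀ i j : Nat, k ≤ i → i < arr.length → j < k → arr.getD i 0 ≤ arr.getD j 0)
    (_Ha : ∀ i < a, arr.getD i 0 = m)
    (Htail : ∀ i : Nat, k ≤ i → i < arr.length → arr.getD i 0 = m)
    (Hbs : ∀ i : Nat, a ≤ i → i < k → m < arr.getD i 0) :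
    ∀ (fuel : Nat) (r : Int), (k : Int) ≤ r → 2 * a ≤ r.toNat → r < arr.length → r.toNat < fuel →
      pvLoop1 arr fuel 0 r = (k : Int) := by
  intro fuel
  induction fuel with
  | zero => intro r _ _ _ hf; exact absurd hf (Nat.not_lt_zero _)
  | succ fuel ih =>
    intro r hkr h2a hrn hf
    have hlr : (0 : Int) < r := by omega
    set mid := PySem.Int.floordiv (0 + r) 2 with hmiddef
    have hb := (PySem.Int.floordiv_eq_iff_of_pos (show (0:Int) < 2 by norm_num)).mp hmiddef.symm
    have hgm : pvGetI arr mid = arr.getD mid.toNat 0 := pvGetI_eq arr mid (by omega) (by omega)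
    have hgr : pvGetI arr r = arr.getD r.toNat 0 := pvGetI_eq arr r (by omega) (by omega)
    have hkR : k ≤ r.toNat := by omega
    have haM : a ≤ mid.toNat := by omega
    have hRm := Htail r.toNat hkR (by omega)
    simp only [pvLoop1, if_pos hlr, ← hmiddef]
    by_cases hMk : mid.toNat < k
    · have hMgt := Hbs mid.toNat haM hMk
      rw [if_pos (by rw [hgm, hgr, hRm]; omega)]
      have hkm := Htail k (le_refl _) hk
      apply pvL3 arr k hk F1 F2 F3 fuel (mid + 1) r (by omega) (by omega) hkr hrn ?_ (by omega)
      have he : (mid + 1).toNat - 1 = mid.toNat := by omega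
      rw [he]; omega
    · push Not at hMk
      have hMm := Htail mid.toNat hMk (by omega)
      rw [if_neg (by rw [hgm, hgr, hRm, hMm]; omega)]
      rw [if_pos (by rw [hgm, hgr, hRm, hMm])]
      have hRk : k < r.toNat := by omega
      have hR2a : 2 * a < r.toNat := by omega
      exact ih (r - 1) (by omega) (by omega) (by omega) (by omega)

-- ---- two-pointer walk lemmas (linear window, mod a no-op) ----
lemma pvModDown (n r : Nat) (h1 : 1 ≤ r) (h2 : r < n) :
    PySem.Int.mod ((r : Int) - 1 + (n : Int)) (n : Int) = (((r - 1 : Nat)) : Int) := by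
  rw [PySem.Int.mod_eq_emod_of_pos (by exact_mod_cast (by omega : 0 < n))]
  rw [Int.add_emod_right]
  rw [Int.emod_eq_of_lt (by omega) (by omega)]
  push_cast [Nat.cast_sub h1]; ring

lemma pvModUp (n l : Nat) (h : l + 1 < n) :
    PySem.Int.mod ((l : Int) + 1) (n : Int) = (((l + 1 : Nat)) : Int) := by
  rw [PySem.Int.mod_eq_emod_of_pos (by exact_mod_cast (by omega : 0 < n))]
  rw [Int.emod_eq_of_lt (by omega) (by omega)]
  push_cast; ring

-- soundness: on a window with no pair summing to t the walk returns false
lemma pvW0 (arr : List Int) (t : Int) :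
    ∀ (fuel : Nat) (l r : Nat), l ≤ r → r < arr.length →
      (∀ i j : Nat, l ≤ i → i < j → j ≤ r → arr.getD i 0 + arr.getD j 0 ≠ t) →
      pvLoop2 arr t (arr.length : Int) fuel (l : Int) (r : Int) = false := by
  intro fuel
  induction fuel with
  | zero => intro l r _ _ _; rfl
  | succ fuel ih =>
    intro l r hlr hrn hnp
    by_cases he : l = r
    · subst he
      simp [pvLoop2]
    · have hlr' : l < r := lt_of_le_of_ne hlr he
      have hne : ((l : Nat) : Int) ≠ ((r : Nat) : Int) := by
        intro hh; exact he (by exact_mod_cast hh)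
      have hgl : pvGetI arr (l : Int) = arr.getD l 0 := pvGetI_natCast _ _ (by omega)
      have hgr : pvGetI arr (r : Int) = arr.getD r 0 := pvGetI_natCast _ _ (by omega)
      simp only [pvLoop2, if_pos hne, hgl, hgr]
      rcases lt_trichotomy (arr.getD l 0 + arr.getD r 0) t with hlt | heq | hgt
      · rw [if_neg (by omega), if_pos (by omega)]
        rw [pvModUp arr.length l (by omega)]
        exact ih (l + 1) r (by omega) hrn (fun i j hi hij hj => hnp i j (by omega) hij hj)
      · exact absurd heq (hnp l r (le_refl _) hlr' (le_refl _))
      · rw [if_pos (by omega)]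
        rw [pvModDown arr.length r (by omega) hrn]
        exact ih l (r - 1) (by omega) (by omega) (fun i j hi hij hj => hnp i j hi hij (by omega))

-- every element below t-m: the left pointer runs into the right one
lemma pvWAll (arr : List Int) (t m : Int)
    (hlast : arr.getD (arr.length - 1) 0 = m)
    (hlow : ∀ i < arr.length, arr.getD i 0 < t - m) :
    ∀ (fuel : Nat) (l : Nat), l ≤ arr.length - 1 → arr.length - 1 - l < fuel →
      pvLoop2 arr t (arr.length : Int) fuel (l : Int) ((arr.length - 1 : Nat) : Int) = false := by
  intro fuel
  induction fuel with
  | zero => intro l _ hf; exact absurd hf (Nat.not_lt_zero _)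
  | succ fuel ih =>
    intro l hl hf
    by_cases he : l = arr.length - 1
    · subst he
      simp [pvLoop2]
    · have hl' : l < arr.length - 1 := lt_of_le_of_ne hl he
      have hne : ((l : Nat) : Int) ≠ ((arr.length - 1 : Nat) : Int) := by
        intro hh; exact he (by exact_mod_cast hh)
      have hgl : pvGetI arr (l : Int) = arr.getD l 0 := pvGetI_natCast _ _ (by omega)
      have hgr : pvGetI arr ((arr.length - 1 : Nat) : Int) = arr.getD (arr.length - 1) 0 :=
        pvGetI_natCast _ _ (by omega)
      have hlo := hlow l (by omega)
      simp only [pvLoop2, if_pos hne, hgl, hgr, hlast]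
      rw [if_neg (by omega), if_pos (by omega)]
      rw [pvModUp arr.length l (by omega)]
      exact ih (l + 1) (by omega) (by omega)

-- left pointer stuck above t-m: every sum is too large, the right pointer runs down
lemma pvWPhase2 (arr : List Int) (t m : Int) (q : Nat)
    (Hmin : ∀ i < arr.length, m ≤ arr.getD i 0) (hqn : q < arr.length)
    (hq : t - m < arr.getD q 0) :
    ∀ (fuel : Nat) (r : Nat), q ≤ r → r < arr.length → r - q < fuel →
      pvLoop2 arr t (arr.length : Int) fuel (q : Int) (r : Int) = false := by
  intro fuel
  induction fuel with
  | zero => intro r _ _ hf; exact absurd hf (Nat.not_lt_zero _)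
  | succ fuel ih =>
    intro r hqr hrn hf
    by_cases he : q = r
    · subst he
      simp [pvLoop2]
    · have hqr' : q < r := lt_of_le_of_ne hqr he
      have hne : ((q : Nat) : Int) ≠ ((r : Nat) : Int) := by
        intro hh; exact he (by exact_mod_cast hh)
      have hgl : pvGetI arr (q : Int) = arr.getD q 0 := pvGetI_natCast _ _ (by omega)
      have hgr : pvGetI arr (r : Int) = arr.getD r 0 := pvGetI_natCast _ _ (by omega)
      have hrm := Hmin r hrn
      simp only [pvLoop2, if_pos hne, hgl, hgr]
      rw [if_pos (by omega)]
      rw [pvModDown arr.length r (by omega) hrn]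
      exact ih (r - 1) (by omega) (by omega) (by omega)

-- t-m absent: walk from (l, n-1) fails
lemma pvWPhase1 (arr : List Int) (t m : Int) (q : Nat)
    (Hmin : ∀ i < arr.length, m ≤ arr.getD i 0) (hqn : q < arr.length - 1)
    (hlow : ∀ i < q, arr.getD i 0 < t - m) (hq : t - m < arr.getD q 0)
    (hlast : arr.getD (arr.length - 1) 0 = m) (_h2m : 2 * m < t) :
    ∀ (fuel : Nat) (l : Nat), l ≤ q → arr.length - l < fuel →
      pvLoop2 arr t (arr.length : Int) fuel (l : Int) ((arr.length - 1 : Nat) : Int) = false := by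
  intro fuel
  induction fuel with
  | zero => intro l _ hf; exact absurd hf (Nat.not_lt_zero _)
  | succ fuel ih =>
    intro l hl hf
    have hne : ((l : Nat) : Int) ≠ ((arr.length - 1 : Nat) : Int) := by
      intro hh
      have : l = arr.length - 1 := by exact_mod_cast hh
      omega
    have hgl : pvGetI arr (l : Int) = arr.getD l 0 := pvGetI_natCast _ _ (by omega)
    have hgr : pvGetI arr ((arr.length - 1 : Nat) : Int) = arr.getD (arr.length - 1) 0 :=
      pvGetI_natCast _ _ (by omega)
    by_cases he : l = q
    · subst he
      simp only [pvLoop2, if_pos hne, hgl, hgr, hlast]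
      rw [if_pos (by omega)]
      rw [pvModDown arr.length (arr.length - 1) (by omega) (by omega)]
      exact pvWPhase2 arr t m l Hmin (by omega) hq fuel (arr.length - 1 - 1)
        (by omega) (by omega) (by omega)
    · have hl' : l < q := lt_of_le_of_ne hl he
      have hlo := hlow l hl'
      simp only [pvLoop2, if_pos hne, hgl, hgr, hlast]
      rw [if_neg (by omega), if_pos (by omega)]
      rw [pvModUp arr.length l (by omega)]
      exact ih (l + 1) (by omega) (by omega)

-- t-m present at pos, everything before it smaller: walk reaches the pair (pos, n-1)
lemma pvWAccept (arr : List Int) (t m : Int) (pos : Nat)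
    (hpos : pos < arr.length - 1) (hlow : ∀ i < pos, arr.getD i 0 < t - m)
    (hpv : arr.getD pos 0 = t - m) (hlast : arr.getD (arr.length - 1) 0 = m) :
    ∀ (fuel : Nat) (l : Nat), l ≤ pos → pos - l < fuel →
      pvLoop2 arr t (arr.length : Int) fuel (l : Int) ((arr.length - 1 : Nat) : Int) = true := by
  intro fuel
  induction fuel with
  | zero => intro l _ hf; exact absurd hf (Nat.not_lt_zero _)
  | succ fuel ih =>
    intro l hl hf
    have hne : ((l : Nat) : Int) ≠ ((arr.length - 1 : Nat) : Int) := by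
      intro hh
      have : l = arr.length - 1 := by exact_mod_cast hh
      omega
    have hgl : pvGetI arr (l : Int) = arr.getD l 0 := pvGetI_natCast _ _ (by omega)
    have hgr : pvGetI arr ((arr.length - 1 : Nat) : Int) = arr.getD (arr.length - 1) 0 :=
      pvGetI_natCast _ _ (by omega)
    by_cases he : l = pos
    · subst he
      simp only [pvLoop2, if_pos hne, hgl, hgr, hlast, hpv]
      rw [if_neg (by omega), if_neg (by omega)]
    · have hl' : l < pos := lt_of_le_of_ne hl he
      have hlo := hlow l hl'
      simp only [pvLoop2, if_pos hne, hgl, hgr, hlast]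
      rw [if_neg (by omega), if_pos (by omega)]
      rw [pvModUp arr.length l (by omega)]
      exact ih (l + 1) (by omega) (by omega)

-- ---- the walk started at a true pivot k computes exactly 'a pair exists' ----
lemma pvStepUp (n k i : Nat) (hn : 0 < n) :
    PySem.Int.mod ((((k + i) % n : Nat) : Int) + 1) (n : Int) = (((k + (i + 1)) % n : Nat) : Int) := by
  rw [PySem.Int.mod_eq_emod_of_pos (by exact_mod_cast hn)]
  have h1 : ((((k + i) % n : Nat) : Int) + 1) = (((k + i) % n + 1 : Nat) : Int) := by push_cast; ring
  rw [h1, ← Int.natCast_mod]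
  congr 1
  rw [Nat.mod_add_mod, Nat.add_assoc]

lemma pvStepDown (n k j : Nat) (hn : 0 < n) (hj : 1 ≤ j) :
    PySem.Int.mod ((((k + j) % n : Nat) : Int) - 1 + (n : Int)) (n : Int) = (((k + (j - 1)) % n : Nat) : Int) := by
  rw [PySem.Int.mod_eq_emod_of_pos (by exact_mod_cast hn)]
  have h1 : ((((k + j) % n : Nat) : Int) - 1 + (n : Int)) = (((k + j) % n + (n - 1) : Nat) : Int) := by
    push_cast [Nat.cast_sub (by omega : 1 ≤ n)]
    ring
  rw [h1, ← Int.natCast_mod]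
  congr 1
  rw [Nat.mod_add_mod]
  have h2 : k + j + (n - 1) = (k + (j - 1)) + n := by omega
  rw [h2, Nat.add_mod_right]

lemma pvLoop2_iff (arr : List Int) (t : Int) (k : Nat) (hk : k < arr.length)
    (hs : List.Pairwise (· ≤ ·) (arr.rotate k)) :
    ∀ (fuel : Nat) (i j : Nat), i ≤ j → j < arr.length → j - i < fuel →
      (pvLoop2 arr t (arr.length) fuel (((k + i) % arr.length : Nat) : Int) (((k + j) % arr.length : Nat) : Int) = true ↔
        ∃ a c : Nat, i ≤ a ∧ a < c ∧ c ≤ j ∧ (arr.rotate k).getD a 0 + (arr.rotate k).getD c 0 = t) := by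
  intro fuel
  induction fuel with
  | zero => intro i j _ _ hf; exact absurd hf (Nat.not_lt_zero _)
  | succ fuel ih =>
    intro i j hij hjn hf
    set n := arr.length with hn
    have hn0 : 0 < n := by omega
    have hin : i < n := by omega
    by_cases hijeq : i = j
    · subst hijeq
      simp only [pvLoop2, ne_eq, not_true_eq_false]
      constructor
      · intro h; simp at h
      · rintro ⟨a, c, ha, hac, hc, _⟩; omega
    · have hij' : i < j := by omega
      have hne : (((k + i) % n : Nat) : Int) ≠ (((k + j) % n : Nat) : Int) := by
        intro he
        apply hijeq
        have he' : (k + i) % n = (k + j) % n := by exact_mod_cast he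
        have h1 := pvInv n k i (by omega) hin
        rw [Nat.add_comm i k, he', ← Nat.add_comm j k, pvInv n k j (by omega) (by omega)] at h1
        omega
      have hgi : pvGetI arr (((k + i) % n : Nat) : Int) = (arr.rotate k).getD i 0 := by
        rw [pvGetI_natCast arr _ (Nat.mod_lt _ hn0), pvRotGetD arr k i hin, Nat.add_comm i k]
      have hgj : pvGetI arr (((k + j) % n : Nat) : Int) = (arr.rotate k).getD j 0 := by
        rw [pvGetI_natCast arr _ (Nat.mod_lt _ hn0), pvRotGetD arr k j (by omega), Nat.add_comm j k]
      set bi := (arr.rotate k).getD i 0 with hbi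
      set bj := (arr.rotate k).getD j 0 with hbj
      simp only [pvLoop2, if_pos hne, hgi, hgj]
      rcases lt_trichotomy t (bi + bj) with hgt | heq | hlt
      · rw [if_pos (by omega : bi + bj > t)]
        rw [pvStepDown n k j hn0 (by omega)]
        rw [ih i (j - 1) (by omega) (by omega) (by omega)]
        constructor
        · rintro ⟨a, c, ha, hac, hc, hsum⟩
          exact ⟨a, c, ha, hac, by omega, hsum⟩
        · rintro ⟨a, c, ha, hac, hc, hsum⟩
          refine ⟨a, c, ha, hac, ?_, hsum⟩
          by_contra hcj
          have hcj' : c = j := by omega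
          subst hcj'
          have hba : bi ≤ (arr.rotate k).getD a 0 :=
            pvSortedLe arr k hs i a ha (by omega)
          omega
      · rw [if_neg (by omega : ¬ bi + bj > t), if_neg (by omega : ¬ bi + bj < t)]
        constructor
        · intro _
          exact ⟨i, j, le_refl i, hij', le_refl j, heq.symm⟩
        · intro _; rfl
      · rw [if_neg (by omega : ¬ bi + bj > t), if_pos (by omega : bi + bj < t)]
        rw [pvStepUp n k i hn0]
        rw [ih (i + 1) j (by omega) hjn (by omega)]
        constructor
        · rintro ⟨a, c, ha, hac, hc, hsum⟩
          exact ⟨a, c, by omega, hac, hc, hsum⟩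
        · rintro ⟨a, c, ha, hac, hc, hsum⟩
          refine ⟨a, c, ?_, hac, hc, hsum⟩
          by_contra hai
          have hai' : a = i := by omega
          subst hai'
          have hbc : (arr.rotate k).getD c 0 ≤ bj :=
            pvSortedLe arr k hs c j hc (by omega)
          omega

-- if the binary search returned the pivot k, A computes exactly 'a pair exists' and agrees with B
lemma pvA_pivot (arr : List Int) (t : Int) (k : Nat) (hne : arr ≠ []) (hk : k < arr.length)
    (hs : List.Pairwise (· ≤ ·) (arr.rotate k))
    (hL : pvLoop1 arr arr.length 0 ((arr.length : Int) - 1) = (k : Int)) :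
    pairInSortedRotated arr t = pairInSortedRotated_alt arr t := by
  set n := arr.length with hn
  have hn0 : 0 < n := List.length_pos_iff.mpr hne
  have hR : PySem.Int.mod ((k : Int) - 1 + (n : Int)) (n : Int) = (((k + (n - 1)) % n : Nat) : Int) := by
    rw [PySem.Int.mod_eq_emod_of_pos (by exact_mod_cast hn0)]
    have h1 : ((k : Int) - 1 + (n : Int)) = ((k + (n - 1) : Nat) : Int) := by
      push_cast [Nat.cast_sub (by omega : 1 ≤ n)]
      ring
    rw [h1, ← Int.natCast_mod]
  have hL' : (k : Int) = (((k + 0) % n : Nat) : Int) := by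
    rw [Nat.add_zero, Nat.mod_eq_of_lt hk]
  have hA : pairInSortedRotated arr t = true ↔ pvHasPair arr t := by
    rw [show pairInSortedRotated arr t =
        pvLoop2 arr t (n : Int) (n + 1)
          (pvLoop1 arr n 0 ((n : Int) - 1))
          (PySem.Int.mod (pvLoop1 arr n 0 ((n : Int) - 1) - 1 + (n : Int)) (n : Int)) from rfl]
    rw [hL, hR, hL']
    rw [pvLoop2_iff arr t k hk hs (n + 1) 0 (n - 1) (by omega) (by omega) (by omega)]
    rw [← pvHasPair_rotate arr t k hk]
    have hlen : (arr.rotate k).length = n := List.length_rotate _ _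
    constructor
    · rintro ⟨a, c, _, hac, hc, hsum⟩
      exact ⟨a, c, hac, by omega, hsum⟩
    · rintro ⟨a, c, hac, hc, hsum⟩
      exact ⟨a, c, by omega, hac, by omega, hsum⟩
  have hB := pvAlt_iff arr t
  cases hA' : pairInSortedRotated arr t with
  | true => exact ((hB.mpr (hA.mp hA')).symm)
  | false =>
    cases hB' : pairInSortedRotated_alt arr t with
    | true => exact absurd (hA.mpr (hB.mp hB')) (by simp [hA'])
    | false => rfl

-- B returns false exactly when there is no pair
lemma pvAlt_false (arr : List Int) (t : Int) (h : ¬ pvHasPair arr t) :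
    pairInSortedRotated_alt arr t = false := by
  cases hb : pairInSortedRotated_alt arr t with
  | false => rfl
  | true => exact absurd ((pvAlt_iff arr t).mp hb) h

-- if the binary search returned 0, A is the walk over the window (0, n-1)
lemma pvAZero (arr : List Int) (t : Int) (hne : arr ≠ [])
    (hL : pvLoop1 arr arr.length 0 ((arr.length : Int) - 1) = 0) :
    pairInSortedRotated arr t
      = pvLoop2 arr t (arr.length : Int) (arr.length + 1) 0 ((arr.length - 1 : Nat) : Int) := by
  have hn0 : 0 < arr.length := List.length_pos_iff.mpr hne
  rw [show pairInSortedRotated arr t =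
      pvLoop2 arr t (arr.length : Int) (arr.length + 1)
        (pvLoop1 arr arr.length 0 ((arr.length : Int) - 1))
        (PySem.Int.mod (pvLoop1 arr arr.length 0 ((arr.length : Int) - 1) - 1 + (arr.length : Int)) (arr.length : Int)) from rfl]
  rw [hL]
  congr 1
  rw [PySem.Int.mod_eq_emod_of_pos (by exact_mod_cast hn0)]
  rw [show (0 : Int) - 1 + (arr.length : Int) = ((arr.length - 1 : Nat) : Int) by
    push_cast [Nat.cast_sub (by omega : 1 ≤ arr.length)]; ring]
  exact Int.emod_eq_of_lt (by omega) (by omega)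

-- both ends carry the minimum and t = 2m: the walk succeeds at once
lemma pvWalkTrue2m (arr : List Int) (t m : Int) (hn2 : 2 ≤ arr.length)
    (h0 : arr.getD 0 0 = m) (hlast : arr.getD (arr.length - 1) 0 = m) (ht : t = 2 * m) :
    pvLoop2 arr t (arr.length : Int) (arr.length + 1) 0 ((arr.length - 1 : Nat) : Int) = true := by
  have hne : (0 : Int) ≠ ((arr.length - 1 : Nat) : Int) := by
    intro hh
    have : (0 : Nat) = arr.length - 1 := by exact_mod_cast hh
    omega
  have hg0 : pvGetI arr (0 : Int) = arr.getD 0 0 := by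
    have := pvGetI_natCast arr 0 (by omega)
    simpa using this
  have hgr : pvGetI arr ((arr.length - 1 : Nat) : Int) = arr.getD (arr.length - 1) 0 :=
    pvGetI_natCast _ _ (by omega)
  simp only [pvLoop2, if_pos hne, hg0, hgr, h0, hlast]
  rw [if_neg (by omega), if_neg (by omega)]

-- shape m^a ++ b ++ m^c, t > 2m, t-m absent: the walk from (0, n-1) fails
lemma pvShapeWalkFalse (arr : List Int) (t m : Int) (a K : Nat)
    (h1a : 1 ≤ a) (haK : a < K) (hKn : K < arr.length)
    (Ha : ∀ i < a, arr.getD i 0 = m)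
    (Htail : ∀ i : Nat, K ≤ i → i < arr.length → arr.getD i 0 = m)
    (Hbs : ∀ i : Nat, a ≤ i → i < K → m < arr.getD i 0)
    (h2m : 2 * m < t) (habs : (t - m) ∉ arr) :
    pvLoop2 arr t (arr.length : Int) (arr.length + 1) 0 ((arr.length - 1 : Nat) : Int) = false := by
  have Hmin : ∀ i < arr.length, m ≤ arr.getD i 0 := by
    intro i hi
    rcases Nat.lt_or_ge i a with h | h
    · rw [Ha i h]
    · rcases Nat.lt_or_ge i K with h2 | h2
      · exact le_of_lt (Hbs i h h2)
      · rw [Htail i h2 hi]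
  have hlast : arr.getD (arr.length - 1) 0 = m := Htail _ (by omega) (by omega)
  by_cases hex : ∃ i, i < arr.length ∧ t - m ≤ arr.getD i 0
  · have hspec := Nat.find_spec hex
    set q := Nat.find hex with hqdef
    have hlow : ∀ i < q, arr.getD i 0 < t - m := by
      intro i hi
      have hni := Nat.find_min hex hi
      push Not at hni
      exact hni (by omega)
    have hqne : arr.getD q 0 ≠ t - m := by
      intro hh
      apply habs
      rw [List.getD_eq_getElem _ _ hspec.1] at hh
      exact hh ▸ List.getElem_mem _
    have hq : t - m < arr.getD q 0 := lt_of_le_of_ne hspec.2 (Ne.symm hqne)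
    have hqK : q < K := by
      by_contra hh
      push Not at hh
      have := Htail q hh hspec.1
      omega
    have := pvWPhase1 arr t m q Hmin (by omega) hlow hq hlast h2m (arr.length + 1) 0
      (by omega) (by omega)
    simpa using this
  · push Not at hex
    have := pvWAll arr t m hlast hex (arr.length + 1) 0 (by omega) (by omega)
    simpa using this

-- shape m^a ++ b ++ m^c, t > 2m, t-m present: the walk from (0, n-1) finds the pair (q, n-1)
lemma pvShapeWalkTrue (arr : List Int) (t m : Int) (a K : Nat) (j0 : Nat)
    (_h1a : 1 ≤ a) (_haK : a < K) (hKn : K < arr.length)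
    (Ha : ∀ i < a, arr.getD i 0 = m)
    (Htail : ∀ i : Nat, K ≤ i → i < arr.length → arr.getD i 0 = m)
    (_Hbs : ∀ i : Nat, a ≤ i → i < K → m < arr.getD i 0)
    (Hbss : ∀ i j : Nat, a ≤ i → i ≤ j → j < K → arr.getD i 0 ≤ arr.getD j 0)
    (h2m : 2 * m < t) (hj : j0 < arr.length) (hjv : arr.getD j0 0 = t - m) :
    pvLoop2 arr t (arr.length : Int) (arr.length + 1) 0 ((arr.length - 1 : Nat) : Int) = true := by
  have hlast : arr.getD (arr.length - 1) 0 = m := Htail _ (by omega) (by omega)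
  have hex : ∃ i, i < arr.length ∧ t - m ≤ arr.getD i 0 := ⟨j0, hj, le_of_eq hjv.symm⟩
  have hspec := Nat.find_spec hex
  set q := Nat.find hex with hqdef
  have hlow : ∀ i < q, arr.getD i 0 < t - m := by
    intro i hi
    have hni := Nat.find_min hex hi
    push Not at hni
    exact hni (by omega)
  have hj0a : a ≤ j0 := by
    by_contra hh
    push Not at hh
    have := Ha j0 hh
    omega
  have hj0K : j0 < K := by
    by_contra hh
    push Not at hh
    have := Htail j0 hh hj
    omega
  have hqle : q ≤ j0 := Nat.find_le ⟨hj, le_of_eq hjv.symm⟩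
  have hqa : a ≤ q := by
    by_contra hh
    push Not at hh
    have := Ha q hh
    omega
  have hpv : arr.getD q 0 = t - m := by
    have h1 := Hbss q j0 hqa hqle hj0K
    omega
  have := pvWAccept arr t m q (by omega) hlow hpv hlast (arr.length + 1) 0 (by omega) (by omega)
  simpa using this

-- shape facts of a non-sorted rotation whose first element is the minimum
lemma pvShapeFacts (arr : List Int) (k : Nat) (hk : k < arr.length) (hk0 : k ≠ 0)
    (hs : List.Pairwise (· ≤ ·) (arr.rotate k)) (hnsor : ¬ List.Pairwise (· ≤ ·) arr)
    (heq0 : arr.getD 0 0 = arr.getD k 0) :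
    1 ≤ pvLead arr ∧ pvLead arr < k ∧
    (∀ i < pvLead arr, arr.getD i 0 = arr.getD k 0) ∧
    (∀ i : Nat, k ≤ i → i < arr.length → arr.getD i 0 = arr.getD k 0) ∧
    (∀ i : Nat, pvLead arr ≤ i → i < k → arr.getD k 0 < arr.getD i 0) ∧
    pvTrail arr = arr.length - k := by
  have hn0 : 0 < arr.length := by omega
  have F1 := pvF1 arr k hk hs
  have F2 := pvF2 arr k hk hs
  have F3 := pvF3 arr k hk hs
  set m := arr.getD k 0 with hm
  have hmin : ∀ i < arr.length, m ≤ arr.getD i 0 := by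
    intro i hi
    rcases Nat.lt_or_ge i k with h | h
    · exact F3 k i (le_refl _) hk h
    · exact F2 k i (le_refl _) h hi
  have hhead : arr.headD 0 = m := by rw [pvHeadD]; exact heq0
  have hTWlen : (arr.takeWhile (· == arr.headD 0)).length = pvLead arr := rfl
  have Ha : ∀ i < pvLead arr, arr.getD i 0 = m := by
    intro i hi
    have := pvTW_eq (· == arr.headD 0) arr i (by rw [hTWlen]; exact hi)
    have h2 : arr.getD i 0 = arr.headD 0 := by simpa using this
    rw [h2, hhead]
  have haLen : pvLead arr ≤ arr.length := by
    rw [← hTWlen]; exact (List.takeWhile_sublist _).length_le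
  have h1a : 1 ≤ pvLead arr := by
    by_contra hh
    push Not at hh
    have := pvTW_max (· == arr.headD 0) arr (by omega)
    rw [hTWlen] at this
    have hz : pvLead arr = 0 := by omega
    rw [hz] at this
    rw [pvHeadD] at this
    simp at this
  have Htail : ∀ i : Nat, k ≤ i → i < arr.length → arr.getD i 0 = m := by
    intro i hki hi
    have h1 := F3 i 0 hki hi (by omega)
    have h2 := hmin i hi
    rw [heq0] at h1
    omega
  have hak : pvLead arr < k := by
    by_contra hh
    push Not at hh
    apply hnsor
    rw [List.pairwise_iff_getElem]
    intro i j hi hj hij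
    have hvi : arr[i] = m := by
      rw [← List.getD_eq_getElem _ 0 hi]
      rcases Nat.lt_or_ge i (pvLead arr) with h | h
      · exact Ha i h
      · exact Htail i (by omega) hi
    have hvj : arr[j] = m := by
      rw [← List.getD_eq_getElem _ 0 hj]
      rcases Nat.lt_or_ge j (pvLead arr) with h | h
      · exact Ha j h
      · exact Htail j (by omega) hj
    rw [hvi, hvj]
  have hbsa : m < arr.getD (pvLead arr) 0 := by
    have hne := pvTW_max (· == arr.headD 0) arr (by rw [hTWlen]; omega)
    rw [hTWlen] at hne
    have h1 : arr.getD (pvLead arr) 0 ≠ m := by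
      intro hh
      rw [hh, hhead] at hne
      simp at hne
    have h2 := hmin (pvLead arr) (by omega)
    omega
  have Hbs : ∀ i : Nat, pvLead arr ≤ i → i < k → m < arr.getD i 0 := by
    intro i hai hik
    have := F1 (pvLead arr) i hai hik
    omega
  refine ⟨h1a, hak, Ha, Htail, Hbs, ?_⟩
  have hrl : arr.reverse.length = arr.length := List.length_reverse
  apply pvTW_len
  · omega
  · intro i hi
    rw [pvRevGetD arr i (by omega)]
    have := Htail (arr.length - 1 - i) (by omega) (by omega)
    rw [this, hhead]
    simp
  · intro hlt
    rw [hrl] at hlt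
    rw [pvRevGetD arr (arr.length - k) (by omega)]
    have he : arr.length - 1 - (arr.length - k) = k - 1 := by omega
    rw [he]
    have := Hbs (k - 1) (by omega) (by omega)
    rw [hhead]
    simp only [beq_eq_false_iff_ne, ne_eq]
    omega

-- ---- main case analysis ----
-- (the master lemma: shape facts + result; filled below)
theorem pvMain (arr : List Int) (t : Int)
    (hpre : Pre_pairInSortedRotated arr t) (hnd : ¬ D_pairInSortedRotated arr t) :
    pairInSortedRotated arr t = pairInSortedRotated_alt arr t := by
  obtain ⟨hne, k, hk, hs⟩ := hpre
  have hn0 : 0 < arr.length := List.length_pos_iff.mpr hne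
  by_cases hsor : List.Pairwise (· ≤ ·) arr
  · have hs0 : List.Pairwise (· ≤ ·) (arr.rotate 0) := by
      simpa [List.rotate_zero] using hsor
    have hL := pvL1 arr (fun i j hij hj => pvF2 arr 0 hn0 hs0 i j (Nat.zero_le _) hij hj)
      arr.length ((arr.length : Int) - 1) (by omega) (by omega) (by omega)
    exact pvA_pivot arr t 0 hne hn0 hs0 (by simpa using hL)
  · have hk0 : k ≠ 0 := by
      rintro rfl
      exact hsor (by simpa [List.rotate_zero] using hs)
    have F1 := pvF1 arr k hk hs
    have F2 := pvF2 arr k hk hs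
    have F3 := pvF3 arr k hk hs
    set m := arr.getD k 0 with hm
    have hmin : ∀ i < arr.length, m ≤ arr.getD i 0 := by
      intro i hi
      rcases Nat.lt_or_ge i k with h | h
      · exact F3 k i (le_refl _) hk h
      · exact F2 k i (le_refl _) h hi
    rcases lt_trichotomy (arr.getD 0 0) m with hlt0 | heq0 | hgt0
    · exact absurd (hmin 0 hn0) (by omega)
    · obtain ⟨h1a, hak, Ha, Htail, Hbs, hTrail⟩ := pvShapeFacts arr k hk hk0 hs hsor heq0
      have hhead : arr.headD 0 = m := by rw [pvHeadD]; exact heq0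
      by_cases h2a : arr.length ≤ 2 * pvLead arr
      · -- the binary search lands at 0
        have hL := pvL2 arr m (pvLead arr) Ha hmin h2a arr.length ((arr.length : Int) - 1)
          (by omega) (by omega) (by omega)
        have hA := pvAZero arr t hne hL
        rcases lt_trichotomy t (2 * m) with ht | ht | ht
        · -- every pair sums to at least 2m > t: both sides false
          have hnp : ¬ pvHasPair arr t := by
            rintro ⟨i, j, hij, hj, hsum⟩
            have := hmin i (by omega)
            have := hmin j (by omega)
            omega
          rw [hA, pvAlt_false arr t hnp]
          refine pvW0 arr t (arr.length + 1) 0 (arr.length - 1) (by omega) (by omega) ?_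
          rintro i j _ hij hj heq
          have := hmin i (by omega)
          have := hmin j (by omega)
          omega
        · -- t = 2m: both true at the pair (0, n-1)
          rw [hA, pvWalkTrue2m arr t m (by omega) heq0 (Htail _ (by omega) (by omega)) ht]
          exact ((pvAlt_iff arr t).mpr ⟨0, arr.length - 1, by omega, by omega, by
            rw [heq0, Htail _ (by omega) (by omega)]; omega⟩).symm
        · by_cases hmem : (t - m) ∈ arr
          · -- t-m present: both true
            obtain ⟨j0, hj0, hjv⟩ := List.mem_iff_getElem.mp hmem
            have hjv' : arr.getD j0 0 = t - m := by
              rw [List.getD_eq_getElem _ _ hj0]; exact hjv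
            rw [hA, pvShapeWalkTrue arr t m (pvLead arr) k j0 h1a hak hk Ha Htail Hbs
              (fun i j hai hij hjk => F1 i j hij hjk) ht hj0 hjv']
            have hj1 : 1 ≤ j0 := by
              rcases Nat.eq_zero_or_pos j0 with h | h
              · rw [h] at hjv'
                rw [heq0] at hjv'
                omega
              · exact h
            exact ((pvAlt_iff arr t).mpr ⟨0, j0, by omega, hj0, by
              rw [heq0, hjv']; ring⟩).symm
          · -- t-m absent: A fails; ¬D_ forces that no pair exists, so B fails too
            have hnp : ¬ pvHasPair arr t := by
              rintro ⟨i, j, hij, hj, hsum⟩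
              apply hnd
              refine ⟨hne, h2a, ?_, ?_, ?_, ?_, ?_, ?_, ?_⟩
              · rw [hTrail]; omega
              · rw [hTrail]; omega
              · intro i2 hi2 hai2
                rw [hTrail] at hi2
                rw [hhead]
                exact Hbs i2 hai2 (by omega)
              · intro j2 hj2 i2 hij2 hai2
                rw [hTrail] at hj2
                exact F1 i2 j2 (by omega) (by omega)
              · rw [hhead]; omega
              · rw [hhead]; exact hmem
              · exact ⟨j, hj, i, hij, hsum⟩
            rw [hA, pvAlt_false arr t hnp]
            exact pvShapeWalkFalse arr t m (pvLead arr) k h1a hak hk Ha Htail Hbs ht hmem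
      · -- leading run shorter than half: the binary search finds the pivot k
        have hL := pvL5 arr k m (pvLead arr) hk hak F1 F2 F3 Ha Htail Hbs
          arr.length ((arr.length : Int) - 1) (by omega) (by omega) (by omega) (by omega)
        exact pvA_pivot arr t k hne hk hs hL
    · have hL := pvL4 arr k hk (by omega) F1 F2 F3 hgt0
        arr.length ((arr.length : Int) - 1) (by omega) (by omega) (by omega)
      exact pvA_pivot arr t k hne hk hs hL

-- ===== VERDICT (by name: the statements are the Claim_ definitions above) =====
theorem pairInSortedRotated_spec : Claim_unchanged_pairInSortedRotated := by
  intro arr t _ hpre hnd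
  exact pvMain arr t hpre hnd

theorem pairInSortedRotated_changed : Claim_changed_pairInSortedRotated := by
  unfold Claim_changed_pairInSortedRotated; decide

theorem pairInSortedRotated_tight : Claim_exact_pairInSortedRotated := by
  intro arr t _ _ hD
  obtain ⟨hne, h2a, hsl, h1c, hmid, hmids, h2m, habs, hpair⟩ := hD
  have hn0 : 0 < arr.length := List.length_pos_iff.mpr hne
  set m := arr.headD 0 with hmdef
  set a := pvLead arr with hadef
  set c := pvTrail arr with hcdef
  set K := arr.length - c with hKdef
  have hTWlen : (arr.takeWhile (· == arr.headD 0)).length = a := rfl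
  have hRTWlen : (arr.reverse.takeWhile (· == arr.headD 0)).length = c := rfl
  have Ha : ∀ i < a, arr.getD i 0 = m := by
    intro i hi
    have := pvTW_eq (· == arr.headD 0) arr i (by rw [hTWlen]; exact hi)
    exact (eq_of_beq this).trans hmdef.symm
  have h1a : 1 ≤ a := by
    by_contra hh
    push Not at hh
    have := pvTW_max (· == arr.headD 0) arr (by rw [hTWlen]; omega)
    rw [hTWlen] at this
    have hz : a = 0 := by omega
    rw [hz, pvHeadD] at this
    simp at this
  have Htail : ∀ i : Nat, K ≤ i → i < arr.length → arr.getD i 0 = m := by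
    intro i hKi hi
    have hrl : arr.reverse.length = arr.length := List.length_reverse
    have hidx : arr.length - 1 - i < c := by omega
    have := pvTW_eq (· == arr.headD 0) arr.reverse (arr.length - 1 - i) (by rw [hRTWlen]; exact hidx)
    rw [pvRevGetD arr (arr.length - 1 - i) (by omega)] at this
    have he : arr.length - 1 - (arr.length - 1 - i) = i := by omega
    rw [he] at this
    exact (eq_of_beq this).trans hmdef.symm
  have hak : a < K := by omega
  have hKn : K < arr.length := by omega
  have Hbs : ∀ i : Nat, a ≤ i → i < K → m < arr.getD i 0 := by
    intro i hai hiK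
    exact hmid i (by omega) hai
  have Hmin : ∀ i < arr.length, m ≤ arr.getD i 0 := by
    intro i hi
    rcases Nat.lt_or_ge i a with h | h
    · rw [Ha i h]
    · rcases Nat.lt_or_ge i K with h2 | h2
      · exact le_of_lt (Hbs i h h2)
      · rw [Htail i h2 hi]
  have hL := pvL2 arr m a Ha Hmin h2a arr.length ((arr.length : Int) - 1)
    (by omega) (by omega) (by omega)
  have hA := pvAZero arr t hne hL
  have hAf : pairInSortedRotated arr t = false := by
    rw [hA]
    exact pvShapeWalkFalse arr t m a K h1a hak hKn Ha Htail Hbs h2m habs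
  obtain ⟨j, hj, i, hij, hsum⟩ := hpair
  have hBt : pairInSortedRotated_alt arr t = true :=
    (pvAlt_iff arr t).mpr ⟨i, j, hij, hj, hsum⟩
  rw [hAf, hBt]
  simp
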